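-- pv_equiv track=rewrite | github.com/RaulCasado/python-exercises | exercices.py | count_matching_letters
-- ===== SOURCE A (Python) =====
-- def count_matching_letters(words):
--     if not words:
--         return 0
--
--     matching_letters = 0
--
--     min_length = min(len(word) for word in words)
--
--     for i in range(min_length):
--         if all(word[i] == words[0][i] for word in words):
--             matching_letters += 1
--
--     return matching_letters
-- ===== SOURCE B (Python) =====
-- def count_matching_letters(words):
--     if not words:
--         return 0
--     mask = [c for c in words[0]]  # surviving candidates; None marks a mismatched column
--     for w in words[1:]:
--         mask = [m if m == c else None for m, c in zip(mask, w)]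
--     return sum(m is not None for m in mask)
-- ===== Notes on version B (the rewrite author's own statement) =====
-- stated objective: alternative
-- what changed: Folds over the words maintaining a shrinking mask of surviving candidate characters (None = mismatch, zip truncates to the shorter word), instead of computing the minimum length and looping over column indices with all(); the count is the surviving entries.
import Mathlib
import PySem

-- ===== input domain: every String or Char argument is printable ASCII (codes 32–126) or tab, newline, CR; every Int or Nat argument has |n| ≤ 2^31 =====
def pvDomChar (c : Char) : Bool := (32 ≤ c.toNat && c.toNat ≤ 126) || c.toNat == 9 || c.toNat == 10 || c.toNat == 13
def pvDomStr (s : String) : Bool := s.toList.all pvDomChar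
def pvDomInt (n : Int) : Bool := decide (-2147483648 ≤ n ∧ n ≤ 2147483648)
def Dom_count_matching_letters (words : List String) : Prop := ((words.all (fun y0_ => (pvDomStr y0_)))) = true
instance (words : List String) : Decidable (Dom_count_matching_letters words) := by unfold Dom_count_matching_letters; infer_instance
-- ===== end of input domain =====

-- B folds over the words with a shrinking mask of surviving candidate characters
-- (none = mismatch; zip truncates), instead of A's index loop up to the min length
-- (alternative decomposition; same cost).

-- ===== PORT A =====
def count_matching_letters (words : List String) : Int :=
  match words with
  | [] => 0
  | w0 :: rest =>
    let ws := w0 :: rest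
    let minLen := (PySem.List.min? (ws.map (fun w => PySem.Str.len w)) (fun x => x)).getD 0
    (PySem.List.pyRange 0 minLen 1).foldl
      (fun acc i =>
        if ws.all (fun w => PySem.Str.pyGet? w i == PySem.Str.pyGet? w0 i) then acc + 1 else acc)
      0

-- ===== PORT B =====
-- one step of B's loop: mask = [m if m == c else None for m, c in zip(mask, w)]
def pvMaskStep (mask : List (Option Char)) (w : String) : List (Option Char) :=
  (mask.zip w.toList).map (fun p => if p.1 == some p.2 then p.1 else none)

def count_matching_letters_alt (words : List String) : Int :=
  match words with
  | [] => 0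
  | w0 :: rest =>
    let mask := rest.foldl pvMaskStep (w0.toList.map some)
    ((mask.countP (fun m => m.isSome) : Nat) : Int)

-- ===== PRECONDITION & SPEC =====
def Spec_count_matching_letters (words : List String) (out : Int) : Prop := out = count_matching_letters_alt words
instance (words : List String) (out : Int) : Decidable (Spec_count_matching_letters words out) := by unfold Spec_count_matching_letters; infer_instance

-- ===== CLAIM (what is proved, stated in full; the proofs are below) =====
def Claim_equal_count_matching_letters : Prop := ∀ (words : List String), Dom_count_matching_letters words → Spec_count_matching_letters words (count_matching_letters words)

-- ===== LEMMAS AND PROOFS =====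

theorem foldl_min_int (rest : List String) (a : Nat) :
    rest.foldl (fun (m : Int) w => min m (PySem.Str.len w)) (a : Int)
      = ((rest.foldl (fun m w => min m w.toList.length) a : Nat) : Int) := by
  induction rest generalizing a with
  | nil => rfl
  | cons w ws ih =>
    rw [List.foldl_cons, List.foldl_cons,
      show min (a : Int) (PySem.Str.len w) = ((min a w.toList.length : Nat) : Int) by
        rw [PySem.Str.len_eq, Nat.cast_min]]
    exact ih _

theorem foldl_min_le_init (cs : List String) (a : Nat) :
    cs.foldl (fun m w => min m w.toList.length) a ≤ a := by
  induction cs generalizing a with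
  | nil => simp
  | cons c cs ih => exact le_trans (ih _) (Nat.min_le_left _ _)

theorem foldl_min_le_mem {cs : List String} {c : String} (hc : c ∈ cs) (a : Nat) :
    cs.foldl (fun m w => min m w.toList.length) a ≤ c.toList.length := by
  induction cs generalizing a with
  | nil => cases hc
  | cons d ds ih =>
    simp only [List.foldl_cons]
    rcases List.mem_cons.mp hc with h | h
    · subst h
      exact le_trans (foldl_min_le_init _ _) (Nat.min_le_right _ _)
    · exact ih h _

-- one step of B on a mask presented column-wise (range/map form)
theorem maskStep_range (M : Nat) (w : String) (g : Nat → Option Char) :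
    pvMaskStep ((List.range M).map g) w
      = (List.range (min M w.toList.length)).map
          (fun k => if g k == some (w.toList.getD k ' ') then g k else none) := by
  apply List.ext_getElem
  · simp [pvMaskStep]
  · intro k h1 h2
    have hk : k < min M w.toList.length := by simpa [pvMaskStep] using h1
    have hkM : k < M := lt_of_lt_of_le hk (Nat.min_le_left _ _)
    have hkw : k < w.toList.length := lt_of_lt_of_le hk (Nat.min_le_right _ _)
    simp [pvMaskStep, List.getElem_zip, List.getElem?_eq_getElem hkw]

-- invariant of B's fold: the mask stays in range/map form, the length is the running min,
-- and each surviving entry records agreement of every processed word with f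
theorem mask_fold (f : Nat → Char) (ws : List String) :
    ∀ (M : Nat) (P : Nat → Bool),
    ws.foldl pvMaskStep ((List.range M).map (fun k => if P k then some (f k) else none))
      = (List.range (ws.foldl (fun m w => min m w.toList.length) M)).map
          (fun k => if P k && ws.all (fun w => w.toList.getD k ' ' == f k)
                    then some (f k) else none) := by
  induction ws with
  | nil => intro M P; simp
  | cons w ws ih =>
    intro M P
    rw [List.foldl_cons, maskStep_range]
    have hstep :
        (fun k => if (if P k then some (f k) else none) == some (w.toList.getD k ' ')
                  then (if P k then some (f k) else none) else none)
        = (fun k => if (P k && (w.toList.getD k ' ' == f k)) then some (f k) else none) := by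
      funext k
      cases P k with
      | true => simp [eq_comm (a := f k)]
      | false => rfl
    rw [hstep, ih]
    rw [List.foldl_cons]
    congr 1
    funext k
    simp [Bool.and_assoc]

theorem init_mask (l : List Char) :
    l.map some = (List.range l.length).map
      (fun k => if (fun _ => true) k then some (l.getD k ' ') else none) := by
  apply List.ext_getElem
  · simp
  · intro k h1 h2
    simp [(by simpa using h1 : k < l.length)]

-- ===== VERDICT (by name: the statement is the Claim_ definition above) =====
theorem count_matching_letters_spec : Claim_equal_count_matching_letters := by
  intro words _
  unfold Spec_count_matching_letters count_matching_letters count_matching_letters_alt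
  match words with
  | [] => rfl
  | w0 :: rest =>
    have hM : ∀ w ∈ w0 :: rest,
        rest.foldl (fun m w => min m w.toList.length) w0.toList.length ≤ w.toList.length := by
      intro w hw
      rcases List.mem_cons.mp hw with h | h
      · subst h; exact foldl_min_le_init _ _
      · exact foldl_min_le_mem h _
    simp only [List.map_cons, PySem.List.min?_id_cons, Option.getD_some]
    rw [List.foldl_map, show PySem.Str.len w0 = ((w0.toList.length : Nat) : Int) from PySem.Str.len_eq w0,
        foldl_min_int, PySem.List.pyRange_zero_natCast, List.foldl_map,
        PySem.List.foldl_ite_add_one, init_mask, mask_fold, List.countP_map, zero_add]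
    congr 1
    apply List.countP_congr
    intro k hk
    have hkM : k < rest.foldl (fun m w => min m w.toList.length) w0.toList.length :=
      List.mem_range.mp hk
    have hget : ∀ w ∈ w0 :: rest, PySem.Str.pyGet? w (k : Int) = some (w.toList.getD k ' ') := by
      intro w hw
      have hlt : k < w.toList.length := lt_of_lt_of_le hkM (hM w hw)
      rw [PySem.Str.pyGet?_natCast, List.getElem?_eq_getElem hlt, List.getD_eq_getElem _ _ hlt]
    simp only [Function.comp, decide_eq_true_eq, Bool.true_and]
    constructor
    · intro hA
      have hall : ∀ w ∈ rest, w.toList.getD k ' ' = w0.toList.getD k ' ' := by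
        intro w hw
        have h1 := List.all_eq_true.mp hA w (List.mem_cons_of_mem _ hw)
        rw [beq_iff_eq, hget w (List.mem_cons_of_mem _ hw), hget w0 List.mem_cons_self] at h1
        exact Option.some_injective _ h1
      simp
      exact fun x hx => hall x hx
    · intro hB
      simp at hB
      refine List.all_eq_true.mpr ?_
      intro w hw
      rw [beq_iff_eq, hget w hw, hget w0 List.mem_cons_self]
      rcases List.mem_cons.mp hw with h | h
      · subst h; rfl
      · exact congrArg some (hB w h)
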